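-- pv_equiv track=rewrite | github.com/jhultberg/AoC2019 | aoc/day8.py | convert_to_pixels
-- ===== SOURCE A (Python) =====
-- def find_showing_color(pixel):
--     for layer in pixel:
--         if layer != 2:
--             return layer
--
-- def convert_to_pixels(layers):
--     pixels = []
--     length = len(layers[0])
--     for l in range(length):
--         pixel = []
--         for layer in layers:
--             pixel.append(layer[l])
--         pixels.append(find_showing_color(pixel))
--     return pixels
-- ===== SOURCE B (Python) =====
-- def convert_to_pixels(layers):
--     length = len(layers[0])
--     result = [None] * length
--     for layer in reversed(layers):
--         for l in range(length):
--             if layer[l] != 2: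
--                 result[l] = layer[l]
--     return result
-- ===== Notes on version B (the rewrite author's own statement) =====
-- stated objective: alternative
-- what changed: Replaces A's per-position column construction plus first-non-transparent scan by a painter's algorithm: initialize the result to None and overwrite, layer by layer in reverse order, every non-transparent pixel in place.
import Mathlib
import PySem

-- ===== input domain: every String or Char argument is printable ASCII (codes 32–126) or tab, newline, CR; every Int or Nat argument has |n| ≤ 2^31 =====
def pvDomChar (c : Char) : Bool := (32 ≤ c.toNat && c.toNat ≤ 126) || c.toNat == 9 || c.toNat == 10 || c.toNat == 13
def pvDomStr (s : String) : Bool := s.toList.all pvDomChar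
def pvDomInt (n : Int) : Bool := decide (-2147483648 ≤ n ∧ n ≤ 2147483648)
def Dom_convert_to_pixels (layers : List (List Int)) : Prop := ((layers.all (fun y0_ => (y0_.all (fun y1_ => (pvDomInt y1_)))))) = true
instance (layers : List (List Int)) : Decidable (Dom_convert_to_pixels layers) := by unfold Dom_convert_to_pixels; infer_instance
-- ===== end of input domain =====

-- B rebuilds the image painter-style: back-to-front overwrite of non-transparent pixels,
-- instead of A's per-position column scan. Alternative decomposition, same cost.


-- ===== PORT A =====
-- find_showing_color: first element ≠ 2, None if all transparent
def findShowingColor : List Int → Option Int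
  | [] => none
  | x :: rest => if x ≠ 2 then some x else findShowingColor rest

-- layer[l]; Pre_ guarantees the index is in range, so getD 0 is never taken on admitted inputs
def pvAt (layer : List Int) (l : Nat) : Int := (PySem.List.pyGet? layer (l : Int)).getD 0

def convert_to_pixels (layers : List (List Int)) : List (Option Int) :=
  let length := ((PySem.List.pyGet? layers 0).getD []).length
  (List.range length).map (fun l =>
    findShowingColor (layers.map (fun layer => pvAt layer l)))

-- ===== PORT B =====
-- inner loop: for l in range(length): if layer[l] != 2: result[l] = layer[l]
def paintLayer (length : Nat) (res : List (Option Int)) (layer : List Int) : List (Option Int) :=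
  (List.range length).foldl
    (fun r l => if pvAt layer l ≠ 2 then r.set l (some (pvAt layer l)) else r) res

def convert_to_pixels_alt (layers : List (List Int)) : List (Option Int) :=
  let length := ((PySem.List.pyGet? layers 0).getD []).length
  layers.reverse.foldl (paintLayer length) (List.replicate length none)

-- ===== PRECONDITION & SPEC =====
-- Pre_ excludes exactly the inputs where Python A raises IndexError: empty layers (layers[0])
-- or a layer shorter than the first one (layer[l]); B raises there too.
def Pre_convert_to_pixels (layers : List (List Int)) : Prop :=
  layers ≠ [] ∧ ∀ L ∈ layers, (layers.headD []).length ≤ L.length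
instance (layers : List (List Int)) : Decidable (Pre_convert_to_pixels layers) := by
  unfold Pre_convert_to_pixels; infer_instance

def pvWitness_convert_to_pixels : List (List Int) := [[2, 1, 2], [0, 2, 2]]

def Spec_convert_to_pixels (layers : List (List Int)) (out : List (Option Int)) : Prop := out = convert_to_pixels_alt layers
instance (layers : List (List Int)) (out : List (Option Int)) : Decidable (Spec_convert_to_pixels layers out) := by unfold Spec_convert_to_pixels; infer_instance

-- ===== CLAIM (what is proved, stated in full; the proofs are below) =====
def Claim_equal_convert_to_pixels : Prop := ∀ (layers : List (List Int)), Dom_convert_to_pixels layers → Pre_convert_to_pixels layers → Spec_convert_to_pixels layers (convert_to_pixels layers)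

-- ===== LEMMAS AND PROOFS =====

theorem paintLayer_length (n : Nat) (res : List (Option Int)) (layer : List Int) :
    (paintLayer n res layer).length = res.length := by
  unfold paintLayer
  induction n generalizing res with
  | zero => simp
  | succ m ih =>
    rw [List.range_succ, List.foldl_append]
    simp only [List.foldl_cons, List.foldl_nil]
    split
    · rw [List.length_set, ih]
    · rw [ih]

theorem paintLayer_getElem? (n : Nat) (res : List (Option Int)) (layer : List Int)
    (i : Nat) (hi : i < res.length) :
    (paintLayer n res layer)[i]? =
      if i < n ∧ pvAt layer i ≠ 2 then some (some (pvAt layer i)) else res[i]? := by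
  unfold paintLayer
  induction n with
  | zero => simp
  | succ m ih =>
    rw [List.range_succ, List.foldl_append]
    simp only [List.foldl_cons, List.foldl_nil]
    have hlen : ((List.range m).foldl
        (fun r l => if pvAt layer l ≠ 2 then r.set l (some (pvAt layer l)) else r) res).length
        = res.length := paintLayer_length m res layer
    by_cases hv : pvAt layer m = 2
    · rw [if_neg (by simp [hv]), ih]
      by_cases him : i = m
      · subst him
        simp [hv]
      · by_cases hlt : i < m
        · simp [hlt, Nat.lt_succ_of_lt hlt]
        · have h2 : ¬ i < m + 1 := by omega
          simp [hlt, h2]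
    · rw [if_pos (by simp [hv])]
      by_cases him : i = m
      · subst him
        rw [List.getElem?_set_self (by omega)]
        simp [hv]
      · rw [List.getElem?_set_ne (by omega), ih]
        by_cases hlt : i < m
        · simp [hlt, Nat.lt_succ_of_lt hlt]
        · have h2 : ¬ i < m + 1 := by omega
          simp [hlt, h2]

def pvAcc (n : Nat) (layers : List (List Int)) : List (Option Int) :=
  layers.reverse.foldl (paintLayer n) (List.replicate n none)

theorem pvAcc_length (n : Nat) (layers : List (List Int)) : (pvAcc n layers).length = n := by
  unfold pvAcc
  induction layers with
  | nil => simp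
  | cons L rest ih =>
    rw [List.reverse_cons, List.foldl_append]
    simp only [List.foldl_cons, List.foldl_nil]
    rw [paintLayer_length]
    exact ih

theorem pvAcc_getElem? (n : Nat) (layers : List (List Int)) (i : Nat) (hi : i < n) :
    (pvAcc n layers)[i]? = some (findShowingColor (layers.map (fun L => pvAt L i))) := by
  induction layers with
  | nil => simp [pvAcc, findShowingColor, hi]
  | cons L rest ih =>
    have hstep : pvAcc n (L :: rest) = paintLayer n (pvAcc n rest) L := by
      unfold pvAcc
      rw [List.reverse_cons, List.foldl_append]
      simp
    rw [hstep, paintLayer_getElem? n _ L i (by rw [pvAcc_length]; exact hi), ih]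
    simp only [List.map_cons, findShowingColor]
    by_cases hv : pvAt L i = 2
    · simp [hv]
    · simp [hv, hi]

theorem convert_eq (layers : List (List Int)) :
    convert_to_pixels layers = convert_to_pixels_alt layers := by
  unfold convert_to_pixels convert_to_pixels_alt
  simp only []
  set n := ((PySem.List.pyGet? layers 0).getD []).length with hn
  have halt : List.foldl (paintLayer n) (List.replicate n none) layers.reverse = pvAcc n layers := rfl
  rw [halt]
  apply List.ext_getElem?
  intro i
  by_cases hi : i < n
  · rw [List.getElem?_map, List.getElem?_range hi]
    exact ((pvAcc_getElem? n layers i hi).symm : _)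
  · rw [List.getElem?_eq_none (by simpa using hi),
        List.getElem?_eq_none (by rw [pvAcc_length n layers]; omega)]

-- ===== VERDICT (by name: the statement is the Claim_ definition above) =====
theorem convert_to_pixels_spec : Claim_equal_convert_to_pixels := by
  intro layers _ _
  unfold Spec_convert_to_pixels
  exact convert_eq layers
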